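-- pv_equiv track=rewrite | github.com/uktrade/lite-frontend | caseworker/advice/services.py | order_by_party_type
-- ===== SOURCE A (Python) =====
-- def order_by_party_type(all_advice):
--     ordered_advice = []
--     party_types = ("consignee", "end_user", "ultimate_end_user", "third_party")
--     for party_type in party_types:
--         for advice in all_advice:
--             if advice.get(party_type) and advice not in ordered_advice:
--                 ordered_advice.append(advice)
--
--     return ordered_advice
-- ===== SOURCE B (Python) =====
-- def order_by_party_type(all_advice):
--     party_types = ("consignee", "end_user", "ultimate_end_user", "third_party")
--     # one pass: bucket each advice under the FIRST party type it matches
--     buckets = ([], [], [], [])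
--     for advice in all_advice:
--         for i, party_type in enumerate(party_types):
--             if advice.get(party_type):
--                 buckets[i].append(advice)
--                 break
--     # concatenate buckets, deduplicating by value in one pass
--     result = []
--     for bucket in buckets:
--         for advice in bucket:
--             if advice not in result:
--                 result.append(advice)
--     return result
-- ===== Notes on version B (the rewrite author's own statement) =====
-- stated objective: alternative
-- what changed: B replaces A's four full scans (one per party type, with dedup interleaved) by a single bucketing pass that files each advice under the first party type it matches, then concatenates the four buckets with one value-equality dedup pass.
import Mathlib
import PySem

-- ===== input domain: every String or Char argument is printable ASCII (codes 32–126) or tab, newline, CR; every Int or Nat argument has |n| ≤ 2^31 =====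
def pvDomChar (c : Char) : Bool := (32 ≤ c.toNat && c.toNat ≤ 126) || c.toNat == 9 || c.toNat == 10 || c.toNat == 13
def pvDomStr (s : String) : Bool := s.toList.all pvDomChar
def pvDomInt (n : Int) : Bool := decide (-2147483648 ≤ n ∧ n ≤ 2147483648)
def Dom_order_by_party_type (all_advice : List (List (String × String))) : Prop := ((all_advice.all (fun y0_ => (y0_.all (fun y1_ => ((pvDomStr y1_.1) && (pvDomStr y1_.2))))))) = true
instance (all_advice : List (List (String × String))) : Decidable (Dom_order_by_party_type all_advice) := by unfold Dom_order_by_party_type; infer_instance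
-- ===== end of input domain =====

-- B replaces A's four full scans (one per party type, dedup interleaved) by one bucketing pass
-- (each advice filed under the first matching party type) plus one dedup pass over the buckets ("alternative").


-- ===== PORT A =====
-- advice.get(party_type): dict lookup (first match on uniquely-keyed lists; Pre_ requires nodup keys)
def pvGet (advice : List (String × String)) (k : String) : Option String :=
  (PySem.Dict.mk advice).get? k

-- Python truthiness of advice.get(pt): some nonempty string
def pvTruthy (o : Option String) : Bool :=
  match o with
  | some s => !(s == "")
  | none => false

def pvPartyTypes : List String := ["consignee", "end_user", "ultimate_end_user", "third_party"]

def order_by_party_type (all_advice : List (List (String × String))) : List (List (String × String)) :=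
  pvPartyTypes.foldl
    (fun ordered_advice party_type =>
      all_advice.foldl
        (fun ordered_advice advice =>
          if pvTruthy (pvGet advice party_type) && !(ordered_advice.contains advice) then
            ordered_advice ++ [advice]
          else
            ordered_advice)
        ordered_advice)
    []

-- ===== PORT B =====
-- inner `for i, party_type in enumerate(...): if ...: break` = index of first matching party type
def pvRank? (advice : List (String × String)) : Option Nat :=
  pvPartyTypes.findIdx? (fun pt => pvTruthy (pvGet advice pt))

def order_by_party_type_alt (all_advice : List (List (String × String))) : List (List (String × String)) :=
  let bs :=
    all_advice.foldl
      (fun (b : List (List (String × String)) × List (List (String × String)) ×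
                List (List (String × String)) × List (List (String × String))) advice =>
        match pvRank? advice with
        | some 0 => (b.1 ++ [advice], b.2.1, b.2.2.1, b.2.2.2)
        | some 1 => (b.1, b.2.1 ++ [advice], b.2.2.1, b.2.2.2)
        | some 2 => (b.1, b.2.1, b.2.2.1 ++ [advice], b.2.2.2)
        | some 3 => (b.1, b.2.1, b.2.2.1, b.2.2.2 ++ [advice])
        | _ => b)
      ([], [], [], [])
  (bs.1 ++ bs.2.1 ++ bs.2.2.1 ++ bs.2.2.2).foldl
    (fun result advice => if result.contains advice then result else result ++ [advice])
    []

-- ===== PRECONDITION & SPEC =====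
-- Pre_ excludes inputs whose dict representation is ambiguous in the assoc-list convention: an advice with a
-- duplicated key (Python's dict keeps the last value, the assoc list the first), and two advices that are equal
-- as Python dicts (same key/value pairs in a different insertion order) without being equal lists — on those the
-- Python programs' value-equality dedup has no faithful assoc-list counterpart.
def Pre_order_by_party_type (all_advice : List (List (String × String))) : Prop :=
  (∀ adv ∈ all_advice, (adv.map Prod.fst).Nodup) ∧
  List.Pairwise (fun d1 d2 => d1.Perm d2 → d1 = d2) all_advice
instance (all_advice : List (List (String × String))) : Decidable (Pre_order_by_party_type all_advice) := by
  unfold Pre_order_by_party_type; infer_instance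

def pvWitness_order_by_party_type : (List (List (String × String))) :=
  [[("consignee", "x")], [("end_user", "y"), ("consignee", "")]]

def Spec_order_by_party_type (all_advice : List (List (String × String))) (out : List (List (String × String))) : Prop := out = order_by_party_type_alt all_advice
instance (all_advice : List (List (String × String))) (out : List (List (String × String))) : Decidable (Spec_order_by_party_type all_advice out) := by unfold Spec_order_by_party_type; infer_instance

-- ===== CLAIM (what is proved, stated in full; the proofs are below) =====
def Claim_equal_order_by_party_type : Prop := ∀ (all_advice : List (List (String × String))), Dom_order_by_party_type all_advice → Pre_order_by_party_type all_advice → Spec_order_by_party_type all_advice (order_by_party_type all_advice)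

-- ===== LEMMAS AND PROOFS =====

-- the shared dedup step and fold
def pvStep (acc : List (List (String × String))) (a : List (String × String)) : List (List (String × String)) :=
  if acc.contains a then acc else acc ++ [a]

def pvDedup (acc : List (List (String × String))) (l : List (List (String × String))) : List (List (String × String)) :=
  l.foldl pvStep acc

theorem pvDedup_cons (acc a l) : pvDedup acc (a :: l) = pvDedup (pvStep acc a) l := rfl

theorem pvDedup_append (acc l1 l2) : pvDedup acc (l1 ++ l2) = pvDedup (pvDedup acc l1) l2 :=
  List.foldl_append

theorem subset_pvStep (acc a) : acc ⊆ pvStep acc a := by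
  unfold pvStep; split <;> simp

theorem subset_pvDedup (acc l) : acc ⊆ pvDedup acc l := by
  induction l generalizing acc with
  | nil => simp [pvDedup]
  | cons a l ih =>
    rw [pvDedup_cons]
    exact fun x hx => ih _ (subset_pvStep _ _ hx)

theorem mem_pvDedup_of_mem (acc : List (List (String × String))) (l : List (List (String × String)))
    {a : List (String × String)} (h : a ∈ l) : a ∈ pvDedup acc l := by
  induction l generalizing acc with
  | nil => cases h
  | cons b l ih =>
    rw [pvDedup_cons]
    rcases List.mem_cons.1 h with rfl | h'
    · refine subset_pvDedup _ _ ?_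
      unfold pvStep; split
      · next hc => simpa using hc
      · simp
    · exact ih _ h'

-- A's inner loop over all_advice equals the dedup fold over the advices matching party_type
theorem innerA_eq (pt : String) (l acc : List (List (String × String))) :
    l.foldl
      (fun ordered_advice advice =>
        if pvTruthy (pvGet advice pt) && !(ordered_advice.contains advice) then
          ordered_advice ++ [advice]
        else ordered_advice) acc
    = pvDedup acc (l.filter (fun a => pvTruthy (pvGet a pt))) := by
  induction l generalizing acc with
  | nil => rfl
  | cons a l ih =>
    simp only [List.foldl_cons, List.filter_cons]
    by_cases h : pvTruthy (pvGet a pt)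
    · simp only [h, if_pos trivial, pvDedup_cons, Bool.true_and]
      rw [← ih]
      congr 1
      unfold pvStep
      by_cases hc : a ∈ acc
      · rw [if_neg (by simp [hc]), if_pos (by simpa using hc)]
      · rw [if_pos (by simp [hc]), if_neg (by simpa using hc)]
    · rw [if_neg (by simp [h]), if_neg (by simpa using h)]
      exact ih acc

-- rank? written as nested ifs on the four membership tests
theorem pvRank?_eq (a : List (String × String)) :
    pvRank? a =
      if pvTruthy (pvGet a "consignee") then some 0
      else if pvTruthy (pvGet a "end_user") then some 1
      else if pvTruthy (pvGet a "ultimate_end_user") then some 2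
      else if pvTruthy (pvGet a "third_party") then some 3
      else none := by
  by_cases h0 : pvTruthy (pvGet a "consignee") <;>
    by_cases h1 : pvTruthy (pvGet a "end_user") <;>
      by_cases h2 : pvTruthy (pvGet a "ultimate_end_user") <;>
        by_cases h3 : pvTruthy (pvGet a "third_party") <;>
          simp [pvRank?, pvPartyTypes, List.findIdx?_cons, h0, h1, h2, h3]

-- replacing "matches pts[r]" by "rank = r" under the fold, once all lower ranks are in acc
theorem pvDedup_filter_congr (r : Nat) (pt : String)
    (hq : ∀ a, pvRank? a = some r → pvTruthy (pvGet a pt) = true)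
    (hlow : ∀ a, pvTruthy (pvGet a pt) = true →
      pvRank? a = some r ∨ (∃ s, s < r ∧ pvRank? a = some s)) :
    ∀ (l acc : List (List (String × String))),
    (∀ a ∈ l, ∀ s, pvRank? a = some s → s < r → a ∈ acc) →
    pvDedup acc (l.filter (fun a => pvTruthy (pvGet a pt)))
      = pvDedup acc (l.filter (fun a => pvRank? a == some r)) := by
  intro l
  induction l with
  | nil => intro acc _; rfl
  | cons a l ih =>
    intro acc H
    simp only [List.filter_cons]
    by_cases hp : pvTruthy (pvGet a pt)
    · rcases hlow a hp with hr | ⟨s, hs, hsl⟩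
      · simp only [hp, if_pos trivial, hr, beq_self_eq_true, pvDedup_cons]
        exact ih _ (fun x hx s hsx hsr => subset_pvStep _ _ (H x (List.mem_cons_of_mem _ hx) s hsx hsr))
      · have hmem : a ∈ acc := H a (List.mem_cons_self) s hsl hs
        have hstep : pvStep acc a = acc := by
          unfold pvStep; rw [if_pos]; simpa using hmem
        rw [if_pos (by simpa using hp), if_neg (by simp [hsl]; omega), pvDedup_cons, hstep]
        exact ih _ (fun x hx => H x (List.mem_cons_of_mem _ hx))
    · have hne : ¬ (pvRank? a == some r) = true := by
        intro hc
        exact hp (hq a (by simpa using hc))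
      rw [if_neg (by simpa using hp), if_neg hne]
      exact ih _ (fun x hx => H x (List.mem_cons_of_mem _ hx))

-- the bucket fold computes the four rank-filtered sublists
theorem buckets_eq (l : List (List (String × String))) (b0 b1 b2 b3 : List (List (String × String))) :
    l.foldl
      (fun (b : List (List (String × String)) × List (List (String × String)) ×
                List (List (String × String)) × List (List (String × String))) advice =>
        match pvRank? advice with
        | some 0 => (b.1 ++ [advice], b.2.1, b.2.2.1, b.2.2.2)
        | some 1 => (b.1, b.2.1 ++ [advice], b.2.2.1, b.2.2.2)
        | some 2 => (b.1, b.2.1, b.2.2.1 ++ [advice], b.2.2.2)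
        | some 3 => (b.1, b.2.1, b.2.2.1, b.2.2.2 ++ [advice])
        | _ => b)
      (b0, b1, b2, b3)
    = (b0 ++ l.filter (fun a => pvRank? a == some 0),
       b1 ++ l.filter (fun a => pvRank? a == some 1),
       b2 ++ l.filter (fun a => pvRank? a == some 2),
       b3 ++ l.filter (fun a => pvRank? a == some 3)) := by
  induction l generalizing b0 b1 b2 b3 with
  | nil => simp
  | cons a l ih =>
    simp only [List.foldl_cons, List.filter_cons]
    rw [pvRank?_eq a]
    by_cases h0 : pvTruthy (pvGet a "consignee") <;>
      by_cases h1 : pvTruthy (pvGet a "end_user") <;>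
        by_cases h2 : pvTruthy (pvGet a "ultimate_end_user") <;>
          by_cases h3 : pvTruthy (pvGet a "third_party") <;>
            simp [h0, h1, h2, h3, ih]

-- ===== VERDICT (by name: the statement is the Claim_ definition above) =====
theorem order_by_party_type_spec : Claim_equal_order_by_party_type := by
  intro all_advice _ _
  unfold Spec_order_by_party_type
  -- rewrite B as one dedup fold over the concatenated rank buckets
  unfold order_by_party_type_alt
  rw [buckets_eq]
  simp only [List.nil_append]
  -- rewrite A as chained dedup folds over the party-type filters
  unfold order_by_party_type pvPartyTypes
  simp only [List.foldl_cons, List.foldl_nil]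
  rw [innerA_eq, innerA_eq, innerA_eq, innerA_eq]
  -- "rank? a = some r implies party type r is truthy", for each r
  have hq0 : ∀ a, pvRank? a = some 0 → pvTruthy (pvGet a "consignee") = true := by
    intro a h; rw [pvRank?_eq] at h; split_ifs at h <;> simp_all
  have hq1 : ∀ a, pvRank? a = some 1 → pvTruthy (pvGet a "end_user") = true := by
    intro a h; rw [pvRank?_eq] at h; split_ifs at h <;> simp_all
  have hq2 : ∀ a, pvRank? a = some 2 → pvTruthy (pvGet a "ultimate_end_user") = true := by
    intro a h; rw [pvRank?_eq] at h; split_ifs at h <;> simp_all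
  have hq3 : ∀ a, pvRank? a = some 3 → pvTruthy (pvGet a "third_party") = true := by
    intro a h; rw [pvRank?_eq] at h; split_ifs at h <;> simp_all
  -- "party type r truthy implies rank? a = some s for some s ≤ r", for each r
  have hl0 : ∀ a, pvTruthy (pvGet a "consignee") = true →
      pvRank? a = some 0 ∨ (∃ s, s < 0 ∧ pvRank? a = some s) := by
    intro a h; exact Or.inl (by rw [pvRank?_eq]; simp [h])
  have hl1 : ∀ a, pvTruthy (pvGet a "end_user") = true →
      pvRank? a = some 1 ∨ (∃ s, s < 1 ∧ pvRank? a = some s) := by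
    intro a h
    by_cases hc : pvTruthy (pvGet a "consignee")
    · exact Or.inr ⟨0, by omega, by rw [pvRank?_eq]; simp [hc]⟩
    · exact Or.inl (by rw [pvRank?_eq]; simp [hc, h])
  have hl2 : ∀ a, pvTruthy (pvGet a "ultimate_end_user") = true →
      pvRank? a = some 2 ∨ (∃ s, s < 2 ∧ pvRank? a = some s) := by
    intro a h
    by_cases hc : pvTruthy (pvGet a "consignee")
    · exact Or.inr ⟨0, by omega, by rw [pvRank?_eq]; simp [hc]⟩
    · by_cases he : pvTruthy (pvGet a "end_user")
      · exact Or.inr ⟨1, by omega, by rw [pvRank?_eq]; simp [hc, he]⟩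
      · exact Or.inl (by rw [pvRank?_eq]; simp [hc, he, h])
  have hl3 : ∀ a, pvTruthy (pvGet a "third_party") = true →
      pvRank? a = some 3 ∨ (∃ s, s < 3 ∧ pvRank? a = some s) := by
    intro a h
    by_cases hc : pvTruthy (pvGet a "consignee")
    · exact Or.inr ⟨0, by omega, by rw [pvRank?_eq]; simp [hc]⟩
    · by_cases he : pvTruthy (pvGet a "end_user")
      · exact Or.inr ⟨1, by omega, by rw [pvRank?_eq]; simp [hc, he]⟩
      · by_cases hu : pvTruthy (pvGet a "ultimate_end_user")
        · exact Or.inr ⟨2, by omega, by rw [pvRank?_eq]; simp [hc, he, hu]⟩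
        · exact Or.inl (by rw [pvRank?_eq]; simp [hc, he, hu, h])
  -- low-rank elements are already in the accumulator when their filter has been processed
  rw [pvDedup_filter_congr 0 "consignee" hq0 hl0 all_advice [] (by intro a _ s _ hs; omega),
      pvDedup_filter_congr 1 "end_user" hq1 hl1 all_advice _ ?m1,
      pvDedup_filter_congr 2 "ultimate_end_user" hq2 hl2 all_advice _ ?m2,
      pvDedup_filter_congr 3 "third_party" hq3 hl3 all_advice _ ?m3,
      ← pvDedup_append, ← pvDedup_append, ← pvDedup_append]
  · simp only [List.append_assoc]
    rfl
  case m1 =>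
    intro a ha s h hs
    interval_cases s
    exact mem_pvDedup_of_mem _ _ (List.mem_filter.2 ⟨ha, by simp [h]⟩)
  case m2 =>
    intro a ha s h hs
    interval_cases s
    · exact subset_pvDedup _ _ (mem_pvDedup_of_mem _ _ (List.mem_filter.2 ⟨ha, by simp [h]⟩))
    · exact mem_pvDedup_of_mem _ _ (List.mem_filter.2 ⟨ha, by simp [h]⟩)
  case m3 =>
    intro a ha s h hs
    interval_cases s
    · exact subset_pvDedup _ _ (subset_pvDedup _ _ (mem_pvDedup_of_mem _ _ (List.mem_filter.2 ⟨ha, by simp [h]⟩)))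
    · exact subset_pvDedup _ _ (mem_pvDedup_of_mem _ _ (List.mem_filter.2 ⟨ha, by simp [h]⟩))
    · exact mem_pvDedup_of_mem _ _ (List.mem_filter.2 ⟨ha, by simp [h]⟩)
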